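-- pv_equiv track=rewrite | github.com/Hp2197/CE_450-HW-2 | 2_10.py | bnc_bck_frth
-- ===== SOURCE A (Python) =====
-- def bnc_bck_frth(k):
--   m,n,i,a=0,1,1,1
--   while(a<=k):
--     m+=n
--     if (a%7==0)+(a%10==7):
--       if i==1:
--         n=-1
--         i=0
--       else:
--         n=1
--         i=1
--     a+=1
--   return m
-- ===== SOURCE B (Python) =====
-- def bnc_bck_frth(k):
--     # Flip events (a%7==0 or a%10==7) are periodic with period 70 and there are
--     # 16 flips per period (even), so the direction sequence has period 70.
--     # Build one period's prefix sums once, then answer in O(1).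
--     if k <= 0:
--         return 0
--     pref = [0]
--     s = 0
--     n = 1
--     for a in range(1, 71):
--         s += n
--         pref.append(s)
--         if a % 7 == 0 or a % 10 == 7:
--             n = -n
--     q, r = divmod(k, 70)
--     return q * s + pref[r]
-- ===== Notes on version B (the rewrite author's own statement) =====
-- stated objective: faster
-- what changed: Replaced the O(k) step-by-step walk with a closed form: the flip events (a%7==0 or a%10==7) repeat with period 70 and each period contains an even number of flips, so B builds one 70-entry prefix-sum table once and answers q*period_sum + table[k%70] in O(1).
import Mathlib
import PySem

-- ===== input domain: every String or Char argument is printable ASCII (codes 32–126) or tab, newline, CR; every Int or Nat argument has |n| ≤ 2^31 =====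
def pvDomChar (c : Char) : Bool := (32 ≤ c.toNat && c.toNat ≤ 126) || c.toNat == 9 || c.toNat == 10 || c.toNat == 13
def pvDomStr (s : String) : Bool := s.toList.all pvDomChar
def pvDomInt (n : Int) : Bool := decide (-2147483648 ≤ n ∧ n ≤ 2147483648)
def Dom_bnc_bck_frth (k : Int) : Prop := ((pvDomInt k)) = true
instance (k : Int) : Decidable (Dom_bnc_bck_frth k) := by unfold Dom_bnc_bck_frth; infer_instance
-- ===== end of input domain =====

set_option maxRecDepth 4000


-- B replaces A's O(k) simulation by a period-70 prefix table and an O(1) closed form.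

-- ===== PORT A =====
-- literal port of A's while loop (state m,n,i, counter a, while a ≤ k)
def pvLoopA (k m n i a : Int) : Int :=
  if _h : a ≤ k then
    let m' := m + n
    -- Python: if (a%7==0)+(a%10==7):   (sum of two bools, truthy iff ≠ 0)
    if ((if PySem.Int.mod a 7 = 0 then (1 : Int) else 0)
        + (if PySem.Int.mod a 10 = 7 then (1 : Int) else 0)) ≠ 0 then
      if i = 1 then pvLoopA k m' (-1) 0 (a + 1)
      else pvLoopA k m' 1 1 (a + 1)
    else pvLoopA k m' n i (a + 1)
  else m
termination_by (k + 1 - a).toNat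
decreasing_by all_goals omega

def bnc_bck_frth (k : Int) : Int := pvLoopA k 0 1 1 1

-- ===== PORT B =====
-- B's table-building loop: for a in range(1,71): s += n; pref.append(s); flip n on event
def pvTable : List Int × Int × Int :=
  (PySem.List.pyRange 1 71 1).foldl
    (fun (st : List Int × Int × Int) (a : Int) =>
      let s := st.2.1 + st.2.2
      let pref := st.1 ++ [s]
      if PySem.Int.mod a 7 = 0 ∨ PySem.Int.mod a 10 = 7 then (pref, s, -st.2.2)
      else (pref, s, st.2.2))
    ([0], 0, 1)

def bnc_bck_frth_alt (k : Int) : Int :=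
  if k ≤ 0 then 0
  else
    -- q, r = divmod(k, 70)
    let q := PySem.Int.floordiv k 70
    let r := PySem.Int.mod k 70
    -- pref[r]: exact, r ∈ [0,70) and pref has 71 entries, so pyGet? is always some
    q * pvTable.2.1 + (PySem.List.pyGet? pvTable.1 r).getD 0

-- ===== PRECONDITION & SPEC =====
def Spec_bnc_bck_frth (k : Int) (out : Int) : Prop := out = bnc_bck_frth_alt k
instance (k : Int) (out : Int) : Decidable (Spec_bnc_bck_frth k out) := by unfold Spec_bnc_bck_frth; infer_instance

-- ===== CLAIM (what is proved, stated in full; the proofs are below) =====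
def Claim_equal_bnc_bck_frth : Prop := ∀ (k : Int), Dom_bnc_bck_frth k → Spec_bnc_bck_frth k (bnc_bck_frth k)

-- ===== LEMMAS AND PROOFS =====

-- proof-side step function: one iteration of A's loop body on state (m,n,i) at counter a
def pvStep (a : Int) (s : Int × Int × Int) : Int × Int × Int :=
  if ((if PySem.Int.mod a 7 = 0 then (1 : Int) else 0)
      + (if PySem.Int.mod a 10 = 7 then (1 : Int) else 0)) ≠ 0 then
    if s.2.2 = 1 then (s.1 + s.2.1, -1, 0) else (s.1 + s.2.1, 1, 1)
  else (s.1 + s.2.1, s.2.1, s.2.2)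

def pvSt : Nat → Int × Int × Int
  | 0 => (0, 1, 1)
  | t + 1 => pvStep ((t : Int) + 1) (pvSt t)

lemma pvLoopA_run (k : Int) (t : Nat) (h : (t : Int) ≤ k) :
    pvLoopA k (pvSt t).1 (pvSt t).2.1 (pvSt t).2.2 ((t : Int) + 1) = (pvSt k.toNat).1 := by
  have hfuel : (k + 1 - ((t : Int) + 1)).toNat = k.toNat - t := by omega
  by_cases hlt : (t : Int) + 1 ≤ k
  · have ih := pvLoopA_run k (t + 1) (by push_cast; omega)
    rw [pvLoopA]
    simp only [hlt, dite_true]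
    have harg : (t : Int) + 1 + 1 = ((t + 1 : Nat) : Int) + 1 := by push_cast; ring
    have hS : pvSt (t + 1) = pvStep ((t : Int) + 1) (pvSt t) := rfl
    by_cases hcond : ((if PySem.Int.mod ((t : Int) + 1) 7 = 0 then (1 : Int) else 0)
        + (if PySem.Int.mod ((t : Int) + 1) 10 = 7 then (1 : Int) else 0)) ≠ 0
    · rw [if_pos hcond]
      by_cases hi : (pvSt t).2.2 = 1
      · have hv : pvSt (t + 1) = ((pvSt t).1 + (pvSt t).2.1, -1, 0) := by
          rw [hS]; unfold pvStep; rw [if_pos hcond, if_pos hi]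
        rw [if_pos hi, harg, ← ih, hv]
      · have hv : pvSt (t + 1) = ((pvSt t).1 + (pvSt t).2.1, 1, 1) := by
          rw [hS]; unfold pvStep; rw [if_pos hcond, if_neg hi]
        rw [if_neg hi, harg, ← ih, hv]
    · have hv : pvSt (t + 1) = ((pvSt t).1 + (pvSt t).2.1, (pvSt t).2.1, (pvSt t).2.2) := by
        rw [hS]; unfold pvStep; rw [if_neg hcond]
      rw [if_neg hcond, harg, ← ih, hv]
  · have ht : k.toNat = t := by omega
    rw [pvLoopA]
    simp [hlt, ht]
termination_by k.toNat - t
decreasing_by omega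

lemma pvStep_shift (a : Int) (s : Int × Int × Int) : pvStep (a + 70) s = pvStep a s := by
  have h7 : PySem.Int.mod (a + 70) 7 = PySem.Int.mod a 7 := by
    rw [PySem.Int.mod_eq_emod_of_pos (by omega), PySem.Int.mod_eq_emod_of_pos (by omega)]
    omega
  have h10 : PySem.Int.mod (a + 70) 10 = PySem.Int.mod a 10 := by
    rw [PySem.Int.mod_eq_emod_of_pos (by omega), PySem.Int.mod_eq_emod_of_pos (by omega)]
    omega
  unfold pvStep
  rw [h7, h10]

lemma pvSt_periodic : ∀ t : Nat, pvSt (t + 70) = pvSt t := by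
  intro t
  induction t with
  | zero => decide
  | succ t ih =>
    show pvStep ((((t : Nat) + 70 : Nat) : Int) + 1) (pvSt (t + 70)) = pvStep ((t : Int) + 1) (pvSt t)
    rw [ih]
    rw [show ((((t : Nat) + 70 : Nat) : Int) + 1) = ((t : Int) + 1) + 70 by push_cast; ring]
    exact pvStep_shift _ _

lemma pvSt_mod (t : Nat) : pvSt t = pvSt (t % 70) := by
  induction t using Nat.strong_induction_on with
  | _ t ih =>
    by_cases h : t < 70
    · rw [Nat.mod_eq_of_lt h]
    · have h1 : t = (t - 70) + 70 := by omega
      rw [h1, pvSt_periodic, ih (t - 70) (by omega)]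
      congr 1
      omega

lemma pvTable_sum : pvTable.2.1 = 0 := by decide

lemma pvTable_pref : ∀ j : Nat, j < 70 →
    (PySem.List.pyGet? pvTable.1 (j : Int)).getD 0 = (pvSt j).1 := by decide

-- ===== VERDICT (by name: the statement is the Claim_ definition above) =====
theorem bnc_bck_frth_spec : Claim_equal_bnc_bck_frth := by
  intro k _
  unfold Spec_bnc_bck_frth bnc_bck_frth bnc_bck_frth_alt
  by_cases hk : k ≤ 0
  · rw [pvLoopA]
    simp [hk, show ¬((1 : Int) ≤ k) by omega]
  · have h1 : (1 : Int) ≤ k := by omega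
    have hA : pvLoopA k 0 1 1 1 = (pvSt k.toNat).1 := by
      have := pvLoopA_run k 0 (by omega)
      simpa [pvSt] using this
    have hr : PySem.Int.mod k 70 = ((k.toNat % 70 : Nat) : Int) := by
      rw [PySem.Int.mod_eq_emod_of_pos (by omega)]
      omega
    rw [hA, pvSt_mod]
    simp only [hk, if_false, pvTable_sum, mul_zero, zero_add, hr]
    exact (pvTable_pref (k.toNat % 70) (Nat.mod_lt _ (by omega))).symm
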